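-- pv_equiv track=rewrite | github.com/ThunderKhan/LeetCode-Solutions | Python/2903FindIndicesWithIndexAndValueDifferenceI.py | findIndices
-- ===== SOURCE A (Python) =====
-- def findIndices(nums : list[int], indexDifference : int, valueDifference : int) -> list[int]:
--     n = len(nums)
--
--     for i in range(n):
--         for j in range(i + 1, n):
--             if ((abs(i - j)) >= indexDifference):
--                 if ((abs(nums[i] - nums[j]) >= valueDifference)):
--                     return [i, j]
--
--     return [-1, -1]
--
-- nums = [5, 1, 4, 1]
--
-- indexDifference = 2
--
-- valueDifference = 4
-- ===== SOURCE B (Python) =====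
-- def findIndices(nums, indexDifference, valueDifference):
--     n = len(nums)
--     # suffix min/max pairs: suff[k] = (min(nums[k:]), max(nums[k:]))
--     suff = []
--     for x in reversed(nums):
--         if not suff:
--             suff.append((x, x))
--         else:
--             mn, mx = suff[-1]
--             suff.append((min(mn, x), max(mx, x)))
--     suff.reverse()
--     for i in range(n):
--         s = i + indexDifference
--         if s < i + 1:
--             s = i + 1
--         if s < n:
--             mn, mx = suff[s]
--             if mx >= nums[i] + valueDifference or mn <= nums[i] - valueDifference:
--                 j = s
--                 while abs(nums[i] - nums[j]) < valueDifference: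
--                     j += 1
--                 return [i, j]
--     return [-1, -1]
-- ===== Notes on version B (the rewrite author's own statement) =====
-- stated objective: faster
-- what changed: Replaces the O(n^2) nested index scan by precomputed suffix min/max arrays: for each i an O(1) existence test over the valid j-range decides whether a partner exists, and only the single answer row is scanned linearly for its first j.
import Mathlib
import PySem

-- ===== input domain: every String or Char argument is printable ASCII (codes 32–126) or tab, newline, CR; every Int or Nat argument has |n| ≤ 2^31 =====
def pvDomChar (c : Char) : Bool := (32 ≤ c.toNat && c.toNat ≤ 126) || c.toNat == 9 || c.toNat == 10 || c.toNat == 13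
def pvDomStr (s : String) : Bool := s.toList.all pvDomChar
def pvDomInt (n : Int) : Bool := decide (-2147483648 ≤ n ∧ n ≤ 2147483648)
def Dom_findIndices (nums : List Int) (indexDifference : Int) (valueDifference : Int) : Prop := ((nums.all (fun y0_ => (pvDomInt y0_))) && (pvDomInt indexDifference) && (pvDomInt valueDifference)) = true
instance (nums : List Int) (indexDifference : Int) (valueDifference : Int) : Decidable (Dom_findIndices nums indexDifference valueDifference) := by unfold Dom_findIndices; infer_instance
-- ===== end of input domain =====

-- B replaces A's nested index scan by suffix min/max arrays: a constant-time existence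
-- test per i, then one linear scan for the first j in the answer row (objective: faster).

-- ===== PORT A =====
-- inner 'for j in range(i+1, n)' loop (indices always in range, so getD is exact)
def findIndicesInnerA (nums : List Int) (indexDifference valueDifference : Int)
    (i j n : Nat) : Option (List Int) :=
  if _h : j < n then
    if |(i : Int) - (j : Int)| ≥ indexDifference then
      if |nums.getD i 0 - nums.getD j 0| ≥ valueDifference then some [(i : Int), (j : Int)]
      else findIndicesInnerA nums indexDifference valueDifference i (j + 1) n
    else findIndicesInnerA nums indexDifference valueDifference i (j + 1) n
  else none
termination_by n - j

-- outer 'for i in range(n)' loop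
def findIndicesOuterA (nums : List Int) (indexDifference valueDifference : Int)
    (i n : Nat) : List Int :=
  if _h : i < n then
    match findIndicesInnerA nums indexDifference valueDifference i (i + 1) n with
    | some r => r
    | none => findIndicesOuterA nums indexDifference valueDifference (i + 1) n
  else [-1, -1]
termination_by n - i

def findIndices (nums : List Int) (indexDifference : Int) (valueDifference : Int) : List Int :=
  findIndicesOuterA nums indexDifference valueDifference 0 nums.length

-- ===== PORT B =====
-- one step of Source B's suffix (min, max) construction (built back-to-front)
def suffStep (acc : List (Int × Int)) (x : Int) : List (Int × Int) :=
  match acc with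
  | [] => [(x, x)]
  | (mn, mx) :: _ => (min mn x, max mx x) :: acc

def buildSuff (nums : List Int) : List (Int × Int) :=
  nums.reverse.foldl suffStep []

-- the 'while abs(nums[i] - nums[j]) < valueDifference: j += 1' loop
-- (the j < n guard only makes the recursion total; the caller guarantees a hit)
def scanJ (nums : List Int) (valueDifference xi : Int) (j n : Nat) : Nat :=
  if _h : j < n then
    if |xi - nums.getD j 0| < valueDifference then scanJ nums valueDifference xi (j + 1) n
    else j
  else j
termination_by n - j

-- the 'for i in range(n)' loop of Source B; s = max(i + indexDifference, i + 1) inlined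
def findIndicesOuterB (nums : List Int) (suff : List (Int × Int))
    (indexDifference valueDifference : Int) (i n : Nat) : List Int :=
  if _h : i < n then
    if max ((i : Int) + indexDifference) ((i : Int) + 1) < (n : Int) ∧
        ((suff.getD (max ((i : Int) + indexDifference) ((i : Int) + 1)).toNat (0, 0)).2 ≥ nums.getD i 0 + valueDifference ∨
         (suff.getD (max ((i : Int) + indexDifference) ((i : Int) + 1)).toNat (0, 0)).1 ≤ nums.getD i 0 - valueDifference) then
      [(i : Int), ((scanJ nums valueDifference (nums.getD i 0) (max ((i : Int) + indexDifference) ((i : Int) + 1)).toNat n : Nat) : Int)]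
    else findIndicesOuterB nums suff indexDifference valueDifference (i + 1) n
  else [-1, -1]
termination_by n - i

def findIndices_alt (nums : List Int) (indexDifference : Int) (valueDifference : Int) : List Int :=
  findIndicesOuterB nums (buildSuff nums) indexDifference valueDifference 0 nums.length

-- ===== PRECONDITION & SPEC =====
def Spec_findIndices (nums : List Int) (indexDifference : Int) (valueDifference : Int) (out : List Int) : Prop := out = findIndices_alt nums indexDifference valueDifference
instance (nums : List Int) (indexDifference : Int) (valueDifference : Int) (out : List Int) : Decidable (Spec_findIndices nums indexDifference valueDifference out) := by unfold Spec_findIndices; infer_instance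

-- ===== CLAIM (what is proved, stated in full; the proofs are below) =====
def Claim_equal_findIndices : Prop := ∀ (nums : List Int) (indexDifference : Int) (valueDifference : Int), Dom_findIndices nums indexDifference valueDifference → Spec_findIndices nums indexDifference valueDifference (findIndices nums indexDifference valueDifference)

-- ===== LEMMAS AND PROOFS =====

-- minimum / maximum of a nonempty list, as computed by the suffix construction
def sMin : List Int → Int
  | [] => 0
  | [x] => x
  | x :: y :: t => min (sMin (y :: t)) x

def sMax : List Int → Int
  | [] => 0
  | [x] => x
  | x :: y :: t => max (sMax (y :: t)) x

theorem buildSuff_cons (x : Int) (xs : List Int) :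
    buildSuff (x :: xs) = suffStep (buildSuff xs) x := by
  unfold buildSuff
  rw [List.reverse_cons, List.foldl_append]
  rfl

theorem buildSuff_eq (x : Int) (xs : List Int) :
    buildSuff (x :: xs) = (sMin (x :: xs), sMax (x :: xs)) :: buildSuff xs := by
  induction xs generalizing x with
  | nil => simp [buildSuff, suffStep, sMin, sMax]
  | cons y t ih =>
    rw [buildSuff_cons, ih y]
    simp [suffStep, sMin, sMax]

theorem buildSuff_getD (nums : List Int) (k : Nat) (hk : k < nums.length) :
    (buildSuff nums).getD k (0, 0) = (sMin (nums.drop k), sMax (nums.drop k)) := by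
  induction nums generalizing k with
  | nil => simp at hk
  | cons x xs ih =>
    rw [buildSuff_eq]
    cases k with
    | zero => simp
    | succ k =>
      simp only [List.getD_cons_succ, List.drop_succ_cons]
      exact ih k (by simpa using hk)

theorem sMax_spec (xs : List Int) (h : xs ≠ []) :
    sMax xs ∈ xs ∧ ∀ y ∈ xs, y ≤ sMax xs := by
  induction xs with
  | nil => exact absurd rfl h
  | cons x t ih =>
    cases t with
    | nil => simp [sMax]
    | cons y s =>
      obtain ⟨hm, hb⟩ := ih (by simp)
      constructor
      · show max (sMax (y :: s)) x ∈ x :: y :: s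
        rcases le_total (sMax (y :: s)) x with hc | hc
        · simp [max_eq_right hc]
        · rw [max_eq_left hc]; exact List.mem_cons_of_mem _ hm
      · intro z hz
        rcases List.mem_cons.1 hz with rfl | hz
        · exact le_max_right _ _
        · exact le_trans (hb z hz) (le_max_left _ _)

theorem sMin_spec (xs : List Int) (h : xs ≠ []) :
    sMin xs ∈ xs ∧ ∀ y ∈ xs, sMin xs ≤ y := by
  induction xs with
  | nil => exact absurd rfl h
  | cons x t ih =>
    cases t with
    | nil => simp [sMin]
    | cons y s =>
      obtain ⟨hm, hb⟩ := ih (by simp)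
      constructor
      · show min (sMin (y :: s)) x ∈ x :: y :: s
        rcases le_total (sMin (y :: s)) x with hc | hc
        · rw [min_eq_left hc]; exact List.mem_cons_of_mem _ hm
        · simp [min_eq_right hc]
      · intro z hz
        rcases List.mem_cons.1 hz with rfl | hz
        · exact min_le_right _ _
        · exact le_trans (min_le_left _ _) (hb z hz)

theorem mem_drop_iff (nums : List Int) (k : Nat) (y : Int) :
    y ∈ nums.drop k ↔ ∃ j, k ≤ j ∧ j < nums.length ∧ nums.getD j 0 = y := by
  constructor
  · intro hy
    obtain ⟨m, hm, he⟩ := List.mem_iff_getElem.1 hy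
    have hlen : k + m < nums.length := by
      have := hm; rw [List.length_drop] at this; omega
    refine ⟨k + m, Nat.le_add_right _ _, hlen, ?_⟩
    rw [List.getD_eq_getElem _ _ hlen, ← he, List.getElem_drop]
  · rintro ⟨j, hkj, hj, he⟩
    rw [List.getD_eq_getElem _ _ hj] at he
    have hm : j - k < (nums.drop k).length := by rw [List.length_drop]; omega
    refine List.mem_iff_getElem.2 ⟨j - k, hm, ?_⟩
    rw [List.getElem_drop]
    simp only [show k + (j - k) = j from by omega]
    exact he

-- the value condition for row i
def VCond (nums : List Int) (valueDifference : Int) (i j : Nat) : Prop :=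
  |nums.getD i 0 - nums.getD j 0| ≥ valueDifference

-- the suffix-array existence test at position k answers "is there a partner j ≥ k?"
theorem guard_iff (nums : List Int) (v : Int) (i k : Nat) (hk : k < nums.length) :
    ((buildSuff nums).getD k (0, 0)).2 ≥ nums.getD i 0 + v ∨
      ((buildSuff nums).getD k (0, 0)).1 ≤ nums.getD i 0 - v ↔
    ∃ j, k ≤ j ∧ j < nums.length ∧ VCond nums v i j := by
  rw [buildSuff_getD nums k hk]
  have hne : nums.drop k ≠ [] := by
    intro h
    have := congrArg List.length h
    rw [List.length_drop] at this
    simp at this; omega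
  obtain ⟨hmxm, hmxb⟩ := sMax_spec _ hne
  obtain ⟨hmnm, hmnb⟩ := sMin_spec _ hne
  constructor
  · rintro (h | h)
    · obtain ⟨j, hkj, hj, he⟩ := (mem_drop_iff nums k _).1 hmxm
      refine ⟨j, hkj, hj, ?_⟩
      unfold VCond
      rw [ge_iff_le, le_abs]
      right; omega
    · obtain ⟨j, hkj, hj, he⟩ := (mem_drop_iff nums k _).1 hmnm
      refine ⟨j, hkj, hj, ?_⟩
      unfold VCond
      rw [ge_iff_le, le_abs]
      left; omega
  · rintro ⟨j, hkj, hj, hv⟩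
    have hmem : nums.getD j 0 ∈ nums.drop k := (mem_drop_iff nums k _).2 ⟨j, hkj, hj, rfl⟩
    have h1 := hmxb _ hmem
    have h2 := hmnb _ hmem
    unfold VCond at hv
    rw [ge_iff_le, le_abs] at hv
    rcases hv with h | h
    · right; omega
    · left; omega

-- A's inner loop skips every j below s = max(i+d, i+1)
theorem innerA_skip (nums : List Int) (d v : Int) (i n j0 : Nat) (hij : i < j0)
    (hs : (j0 : Int) < max ((i : Int) + d) ((i : Int) + 1)) :
    findIndicesInnerA nums d v i j0 n = findIndicesInnerA nums d v i (j0 + 1) n := by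
  by_cases hjn : j0 < n
  · have hidx : ¬ (|(i : Int) - (j0 : Int)| ≥ d) := by
      have habs : |(i : Int) - (j0 : Int)| = (j0 : Int) - i := by
        rw [abs_sub_comm]
        exact abs_of_nonneg (by omega)
      rw [habs]
      have : (j0 : Int) < (i : Int) + d := by
        rcases max_cases ((i : Int) + d) ((i : Int) + 1) with ⟨he, _⟩ | ⟨he, hlt⟩ <;>
          rw [he] at hs <;> omega
      omega
    rw [findIndicesInnerA, dif_pos hjn, if_neg hidx]
  · rw [findIndicesInnerA, dif_neg hjn, findIndicesInnerA, dif_neg (by omega)]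

theorem innerA_skip_upto (nums : List Int) (d v : Int) (i n : Nat) :
    ∀ k : Nat, ((i : Int) + 1 + k ≤ max ((i : Int) + d) ((i : Int) + 1)) →
      findIndicesInnerA nums d v i (i + 1) n = findIndicesInnerA nums d v i (i + 1 + k) n := by
  intro k
  induction k with
  | zero => intro _; rfl
  | succ k ih =>
    intro hk
    rw [ih (by omega), innerA_skip nums d v i n (i + 1 + k) (by omega) (by push_cast at hk ⊢; omega)]
    rfl

-- from s on, the index condition always holds, so A's inner loop is B's value scan
theorem innerA_eq_scan (nums : List Int) (d v : Int) (i n : Nat) :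
    ∀ (m j0 : Nat), n ≤ j0 + m → (max ((i : Int) + d) ((i : Int) + 1)).toNat ≤ j0 →
      (∃ j, j0 ≤ j ∧ j < n ∧ VCond nums v i j) →
      findIndicesInnerA nums d v i j0 n =
        some [(i : Int), (scanJ nums v (nums.getD i 0) j0 n : Int)] := by
  intro m
  induction m with
  | zero =>
    intro j0 hfuel _ hE
    obtain ⟨j, h1, h2, _⟩ := hE
    omega
  | succ m ih =>
    intro j0 hfuel hs hE
    have hjn : j0 < n := by obtain ⟨j, h1, h2, _⟩ := hE; omega
    have hidx : |(i : Int) - (j0 : Int)| ≥ d := by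
      have h1 : ((i : Int) + d ≤ j0) ∧ ((i : Int) + 1 ≤ j0) := by
        constructor <;>
        · have := le_max_left ((i : Int) + d) ((i : Int) + 1)
          have := le_max_right ((i : Int) + d) ((i : Int) + 1)
          omega
      rw [abs_sub_comm, abs_of_nonneg (by omega)]
      omega
    by_cases hV : VCond nums v i j0
    · unfold VCond at hV
      rw [findIndicesInnerA, dif_pos hjn, if_pos hidx, if_pos hV,
        scanJ, dif_pos hjn, if_neg (not_lt.2 hV)]
    · unfold VCond at hV
      rw [findIndicesInnerA, dif_pos hjn, if_pos hidx, if_neg hV,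
        scanJ, dif_pos hjn, if_pos (lt_of_not_ge hV)]
      apply ih (j0 + 1) (by omega) (by omega)
      obtain ⟨j, h1, h2, h3⟩ := hE
      have : j ≠ j0 := by rintro rfl; exact hV h3
      exact ⟨j, by omega, h2, h3⟩

theorem innerA_none (nums : List Int) (d v : Int) (i n : Nat) :
    ∀ (m j0 : Nat), n ≤ j0 + m → (¬ ∃ j, j0 ≤ j ∧ j < n ∧ VCond nums v i j) →
      findIndicesInnerA nums d v i j0 n = none := by
  intro m
  induction m with
  | zero =>
    intro j0 hfuel _
    rw [findIndicesInnerA, dif_neg (by omega)]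
  | succ m ih =>
    intro j0 hfuel hE
    by_cases hjn : j0 < n
    · have hnext : ¬ ∃ j, j0 + 1 ≤ j ∧ j < n ∧ VCond nums v i j := by
        rintro ⟨j, h1, h2, h3⟩; exact hE ⟨j, by omega, h2, h3⟩
      rw [findIndicesInnerA, dif_pos hjn]
      split_ifs with h1 h2
      · exact absurd ⟨j0, le_refl _, hjn, h2⟩ hE
      · exact ih (j0 + 1) (by omega) hnext
      · exact ih (j0 + 1) (by omega) hnext
    · rw [findIndicesInnerA, dif_neg hjn]

theorem outer_eq (nums : List Int) (d v : Int) :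
    ∀ (m i : Nat), nums.length ≤ i + m →
      findIndicesOuterA nums d v i nums.length =
        findIndicesOuterB nums (buildSuff nums) d v i nums.length := by
  intro m
  induction m with
  | zero =>
    intro i hfuel
    rw [findIndicesOuterA, dif_neg (by omega), findIndicesOuterB, dif_neg (by omega)]
  | succ m ih =>
    intro i hfuel
    by_cases hin : i < nums.length
    · have hs1 : (1 : Int) ≤ max ((i : Int) + d) ((i : Int) + 1) := by
        have := le_max_right ((i : Int) + d) ((i : Int) + 1); omega
      have hsnat : ((max ((i : Int) + d) ((i : Int) + 1)).toNat : Int) =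
          max ((i : Int) + d) ((i : Int) + 1) := by omega
      have hsge : i + 1 ≤ (max ((i : Int) + d) ((i : Int) + 1)).toNat := by
        have := le_max_right ((i : Int) + d) ((i : Int) + 1); omega
      rw [findIndicesOuterA, dif_pos hin, findIndicesOuterB, dif_pos hin]
      by_cases hC : max ((i : Int) + d) ((i : Int) + 1) < (nums.length : Int) ∧
          (((buildSuff nums).getD (max ((i : Int) + d) ((i : Int) + 1)).toNat (0, 0)).2 ≥ nums.getD i 0 + v ∨
           ((buildSuff nums).getD (max ((i : Int) + d) ((i : Int) + 1)).toNat (0, 0)).1 ≤ nums.getD i 0 - v)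
      · obtain ⟨hlt, hg⟩ := hC
        have hkn : (max ((i : Int) + d) ((i : Int) + 1)).toNat < nums.length := by omega
        have hE := (guard_iff nums v i _ hkn).1 hg
        have hskip := innerA_skip_upto nums d v i nums.length
          ((max ((i : Int) + d) ((i : Int) + 1)).toNat - (i + 1)) (by omega)
        have hidx : i + 1 + ((max ((i : Int) + d) ((i : Int) + 1)).toNat - (i + 1)) =
            (max ((i : Int) + d) ((i : Int) + 1)).toNat := by omega
        rw [hidx] at hskip
        rw [hskip, innerA_eq_scan nums d v i nums.length nums.length _ (by omega) (le_refl _) hE,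
          if_pos ⟨hlt, hg⟩]
      · have hnone : findIndicesInnerA nums d v i (i + 1) nums.length = none := by
          by_cases hlt : max ((i : Int) + d) ((i : Int) + 1) < (nums.length : Int)
          · have hkn : (max ((i : Int) + d) ((i : Int) + 1)).toNat < nums.length := by omega
            have hg : ¬ (((buildSuff nums).getD (max ((i : Int) + d) ((i : Int) + 1)).toNat (0, 0)).2 ≥ nums.getD i 0 + v ∨
                ((buildSuff nums).getD (max ((i : Int) + d) ((i : Int) + 1)).toNat (0, 0)).1 ≤ nums.getD i 0 - v) := by
              intro hg; exact hC ⟨hlt, hg⟩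
            have hnE : ¬ ∃ j, (max ((i : Int) + d) ((i : Int) + 1)).toNat ≤ j ∧
                j < nums.length ∧ VCond nums v i j := by
              intro hEx; exact hg ((guard_iff nums v i _ hkn).2 hEx)
            have hskip := innerA_skip_upto nums d v i nums.length
              ((max ((i : Int) + d) ((i : Int) + 1)).toNat - (i + 1)) (by omega)
            have hidx : i + 1 + ((max ((i : Int) + d) ((i : Int) + 1)).toNat - (i + 1)) =
                (max ((i : Int) + d) ((i : Int) + 1)).toNat := by omega
            rw [hidx] at hskip
            rw [hskip]
            exact innerA_none nums d v i nums.length nums.length _ (by omega) hnE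
          · have hskip := innerA_skip_upto nums d v i nums.length
              (nums.length - (i + 1)) (by omega)
            have hidx : i + 1 + (nums.length - (i + 1)) = nums.length := by omega
            rw [hidx] at hskip
            rw [hskip, findIndicesInnerA, dif_neg (by omega)]
        rw [hnone, if_neg hC]
        exact ih (i + 1) (by omega)
    · rw [findIndicesOuterA, dif_neg hin, findIndicesOuterB, dif_neg hin]

-- ===== VERDICT (by name: the statement is the Claim_ definition above) =====
theorem findIndices_spec : Claim_equal_findIndices := by
  intro nums d v _
  unfold Spec_findIndices findIndices findIndices_alt
  exact outer_eq nums d v nums.length 0 (by omega)
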